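-- pv_equiv track=rewrite | github.com/naitao/HashCode | TheChallenge.py | cutNum
-- ===== SOURCE A (Python) =====
-- def cutNum(strings):
--     count = 0
--     numString = ''
--     for offset in range(len(strings)):
--         if strings[offset].isdigit():
--             numString += strings[offset]
--             count += 1
--         if strings[offset] == '[':
--             num = int(numString)
--             return num, count
-- ===== SOURCE B (Python) =====
-- def cutNum(strings):
--     i = strings.find('[')
--     if i < 0:
--         return None
--     ds = ''
--     for j in range(i - 1, -1, -1):
--         c = strings[j]
--         if c.isdigit():
--             ds = c + ds
--     return int(ds), len(ds)
-- ===== Notes on version B (the rewrite author's own statement) =====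
-- stated objective: faster
-- what changed: B first locates the first '[' with str.find (guarding its absence), then walks the prefix right-to-left building the digit string back-to-front by prepending, and parses/measures it once at the end, instead of A's per-character forward scan with accumulator string, counter and early return; the C-level find and the single int()/len() give a large constant-factor win.
-- outside the precondition, e.g. on cutNum('['): A raises ValueError, B raises ValueError
import Mathlib
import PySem

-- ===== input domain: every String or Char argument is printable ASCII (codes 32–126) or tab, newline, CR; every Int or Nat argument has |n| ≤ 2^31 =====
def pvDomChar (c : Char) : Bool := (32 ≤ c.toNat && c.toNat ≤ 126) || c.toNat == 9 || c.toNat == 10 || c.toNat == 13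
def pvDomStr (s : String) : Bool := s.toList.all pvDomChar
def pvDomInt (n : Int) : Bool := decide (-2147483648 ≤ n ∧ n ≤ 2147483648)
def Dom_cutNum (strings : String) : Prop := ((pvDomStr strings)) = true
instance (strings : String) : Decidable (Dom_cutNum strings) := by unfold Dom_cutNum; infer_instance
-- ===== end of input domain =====

-- B locates the first '[' with str.find first, then walks the prefix right-to-left building the
-- digit string back-to-front, parsing and measuring it once — instead of A's forward scan with
-- accumulator string, counter and early return. Return-value equivalence only.

-- ===== PORT A =====
-- single forward scan: accumulate digit chars and a count; at the first '[' parse the digits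
def cutNumGo : List Char → Int → List Char → Option (Int × Int)
  | [], _, _ => none
  | c :: rest, count, ns =>
    let ns' := if PySem.Chars.isdigit c then ns ++ [c] else ns
    let count' := if PySem.Chars.isdigit c then count + 1 else count
    if c = '[' then (PySem.Int.ofChars? ns').map (fun n => (n, count'))
    else cutNumGo rest count' ns'

def cutNum (strings : String) : Option (Int × Int) :=
  cutNumGo strings.toList 0 []

-- ===== PORT B =====
-- the loop 'for j in range(i-1, -1, -1): if s[j].isdigit(): ds = s[j] + ds' walks the prefix
-- strings[:i] right-to-left, i.e. structurally over (take i).reverse, prepending digits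
def cutNumAltGo : List Char → List Char → List Char
  | [], ds => ds
  | c :: rest, ds => cutNumAltGo rest (if PySem.Chars.isdigit c then c :: ds else ds)

def cutNum_alt (strings : String) : Option (Int × Int) :=
  let i := PySem.Str.find strings "["
  if i < 0 then none
  else
    let ds := cutNumAltGo ((strings.toList.take i.toNat).reverse) []
    (PySem.Int.ofChars? ds).map (fun n => (n, (ds.length : Int)))

-- ===== PRECONDITION & SPEC =====
-- Pre_ excludes exactly the inputs on which both Pythons raise ValueError (int applied to an empty digit string): a first
-- '[' with no digit anywhere before it ('[' absent means A falls off and returns None, kept).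
def Pre_cutNum (strings : String) : Prop :=
  '[' ∈ strings.toList →
    ((strings.toList.takeWhile (fun c => c != '[')).filter PySem.Chars.isdigit) ≠ []
instance (strings : String) : Decidable (Pre_cutNum strings) := by unfold Pre_cutNum; infer_instance

def pvWitness_cutNum : String := "12a3[x]"

def Spec_cutNum (strings : String) (out : Option (Int × Int)) : Prop := out = cutNum_alt strings
instance (strings : String) (out : Option (Int × Int)) : Decidable (Spec_cutNum strings out) := by unfold Spec_cutNum; infer_instance

-- ===== CLAIM (what is proved, stated in full; the proofs are below) =====
def Claim_equal_cutNum : Prop := ∀ (strings : String), Dom_cutNum strings → Pre_cutNum strings → Spec_cutNum strings (cutNum strings)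

-- ===== LEMMAS AND PROOFS =====

theorem map_pair_congr (o : Option Int) (a b : Int) (h : a = b) :
    o.map (fun n => (n, a)) = o.map (fun n => (n, b)) := by rw [h]

-- invariant of A's scan: the result is determined by the digits of the prefix before the first '['
theorem cutNumGo_spec (cs : List Char) : ∀ (count : Int) (ns : List Char),
    cutNumGo cs count ns =
      if '[' ∈ cs then
        (PySem.Int.ofChars?
            (ns ++ (cs.takeWhile (fun c => c != '[')).filter PySem.Chars.isdigit)).map
          (fun n => (n, count + (((cs.takeWhile (fun c => c != '[')).filter PySem.Chars.isdigit).length : Int)))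
      else none := by
  induction cs with
  | nil => intro count ns; simp [cutNumGo]
  | cons c rest ih =>
    intro count ns
    by_cases hc : c = '['
    · subst hc
      simp [cutNumGo, List.takeWhile, PySem.Chars.isdigit]
    · have hc' : ¬('[' = c) := fun h => hc h.symm
      have hne : (c != '[') = true := by simp [hc]
      by_cases hd : PySem.Chars.isdigit c = true
      · rw [show cutNumGo (c :: rest) count ns = cutNumGo rest (count + 1) (ns ++ [c]) from by
          simp [cutNumGo, hd, hc], ih]
        by_cases hm : '[' ∈ rest
        · simp only [hm, if_pos, List.mem_cons, hc', false_or, List.takeWhile_cons, hne,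
            List.filter_cons, hd]
          rw [List.append_assoc]
          simp only [List.singleton_append, List.length_cons]
          exact map_pair_congr _ _ _ (by push_cast; ring)
        · simp [hm, hc']
      · rw [show cutNumGo (c :: rest) count ns = cutNumGo rest count ns from by
          simp [cutNumGo, hd, hc], ih]
        simp [List.mem_cons, hc', hne, hd]

-- B's reverse walk with prepending yields the digits of the walked list, in original order
theorem cutNumAltGo_spec (l : List Char) : ∀ (ds : List Char),
    cutNumAltGo l ds = (l.reverse.filter PySem.Chars.isdigit) ++ ds := by
  induction l with
  | nil => intro ds; simp [cutNumAltGo]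
  | cons c rest ih =>
    intro ds
    by_cases hd : PySem.Chars.isdigit c = true
    · simp [cutNumAltGo, hd, ih, List.filter_append]
    · simp [cutNumAltGo, hd, ih, List.filter_append]

-- the prefix before the FIRST occurrence of '[' is exactly takeWhile (· ≠ '[')
theorem take_eq_takeWhile (cs : List Char) : ∀ (k : Nat), (hk : k < cs.length) →
    cs[k] = '[' → (∀ j (hj : j < k), cs[j] ≠ '[') →
    cs.take k = cs.takeWhile (fun c => c != '[') := by
  induction cs with
  | nil => intro k hk; simp at hk
  | cons c rest ih =>
    intro k hk hat hbefore
    cases k with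
    | zero => simp_all
    | succ k =>
      have hc : c ≠ '[' := by
        have := hbefore 0 (Nat.succ_pos k); simpa using this
      have h1 : (c != '[') = true := by simp [hc]
      simp only [List.take_succ_cons, List.takeWhile_cons, h1, if_pos]
      rw [ih k (by simpa using hk) (by simpa using hat)
        (fun j hj => by have := hbefore (j+1) (by omega); simpa using this)]

-- ===== VERDICT (by name: the statement is the Claim_ definition above) =====
theorem cutNum_spec : Claim_equal_cutNum := by
  intro s _ _
  unfold Spec_cutNum cutNum cutNum_alt
  rw [cutNumGo_spec]
  rw [PySem.Str.find_eq]
  have hls : ("[" : String).toList = ['['] := rfl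
  rw [hls]
  by_cases hm : '[' ∈ s.toList
  · obtain ⟨l, r, hlr⟩ := List.mem_iff_append.mp hm
    have hinf : ['['] <:+: s.toList := ⟨l, r, by rw [hlr]; simp⟩
    have hnn : 0 ≤ PySem.Chars.find s.toList ['['] :=
      (PySem.Chars.find_nonneg_iff _ _).mpr hinf
    obtain ⟨hpre, hfirst⟩ := PySem.Chars.find_spec (s := s.toList) (sub := ['[']) hnn
    set k := (PySem.Chars.find s.toList ['[']).toNat with hk
    obtain ⟨t, ht⟩ := hpre
    have hlen := congrArg List.length ht
    simp only [List.length_append, List.length_cons, List.length_nil, List.length_drop] at hlen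
    have hklen : k < s.toList.length := by omega
    have hat : s.toList[k] = '[' := by
      have h2 := congrArg (fun l => l.head?) ht
      simpa [List.head?_drop, List.getElem?_eq_getElem hklen] using h2.symm
    have hbefore : ∀ j (hj : j < k), s.toList[j] ≠ '[' := by
      intro j hj hEq
      refine hfirst j hj ⟨s.toList.drop (j+1), ?_⟩
      have hd : List.drop j s.toList = s.toList[j] :: List.drop (j+1) s.toList :=
        List.drop_eq_getElem_cons (by omega)
      rw [List.singleton_append, hd, hEq]
    have hneg : ¬ PySem.Chars.find s.toList ['['] < 0 := by omega
    rw [if_pos hm, if_neg hneg]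
    rw [cutNumAltGo_spec, take_eq_takeWhile s.toList k hklen hat hbefore]
    simp
  · have hfe : PySem.Chars.find s.toList ['['] = -1 := by
      rw [PySem.Chars.find_eq_neg_one_iff]
      intro hinf
      exact hm (hinf.mem (by simp))
    rw [if_neg hm, if_pos (by rw [hfe]; norm_num)]
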